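-- pv_equiv track=rewrite | github.com/mrorigo/code-flow-mcp | code_flow_graph/core/typescript_extractor.py | _infer_framework_from_decorator_name
-- ===== SOURCE A (Python) =====
-- def _infer_framework_from_decorator_name(decorator_name: str) -> str:
--     """Infer framework from decorator name."""
--     framework_decorators = {
--         'angular': ['Component', 'Directive', 'Pipe', 'Injectable', 'Input', 'Output'],
--         'nestjs': ['Controller', 'Module', 'Injectable', 'Get', 'Post', 'Put', 'Delete'],
--         'typeorm': ['Entity', 'Column', 'PrimaryGeneratedColumn'],
--         'react': [],  # React doesn't typically use decorators in the same way
--         'vue': [],    # Vue 3 doesn't use decorators like Angular/NestJS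
--         'express': [] # Express doesn't use decorators
--     }
--
--     for framework, decorators in framework_decorators.items():
--         if decorator_name in decorators:
--             return framework
--
--     return 'unknown'
-- ===== SOURCE B (Python) =====
-- # Hand-flattened lookup table: the framework->decorators mapping inverted by hand
-- # into one decorator->framework dict (Injectable listed once, under angular, which
-- # A's iteration order picks first); the function is a single dict lookup.
-- _DECORATOR_TO_FRAMEWORK = {
--     'Component': 'angular',
--     'Directive': 'angular',
--     'Pipe': 'angular',
--     'Injectable': 'angular',
--     'Input': 'angular',
--     'Output': 'angular',
--     'Controller': 'nestjs',
--     'Module': 'nestjs',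
--     'Get': 'nestjs',
--     'Post': 'nestjs',
--     'Put': 'nestjs',
--     'Delete': 'nestjs',
--     'Entity': 'typeorm',
--     'Column': 'typeorm',
--     'PrimaryGeneratedColumn': 'typeorm',
-- }
--
--
-- def _infer_framework_from_decorator_name(decorator_name: str) -> str:
--     """Infer framework from decorator name via a flat lookup table."""
--     return _DECORATOR_TO_FRAMEWORK.get(decorator_name, 'unknown')
-- ===== Notes on version B (the rewrite author's own statement) =====
-- stated objective: idiomatic
-- what changed: Replaces the per-call loop over frameworks with membership scans over each decorator list by a single hand-flattened decorator->framework dict (Injectable kept under angular, the framework A's iteration order returns first), so the function body is one dict lookup.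
import Mathlib
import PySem

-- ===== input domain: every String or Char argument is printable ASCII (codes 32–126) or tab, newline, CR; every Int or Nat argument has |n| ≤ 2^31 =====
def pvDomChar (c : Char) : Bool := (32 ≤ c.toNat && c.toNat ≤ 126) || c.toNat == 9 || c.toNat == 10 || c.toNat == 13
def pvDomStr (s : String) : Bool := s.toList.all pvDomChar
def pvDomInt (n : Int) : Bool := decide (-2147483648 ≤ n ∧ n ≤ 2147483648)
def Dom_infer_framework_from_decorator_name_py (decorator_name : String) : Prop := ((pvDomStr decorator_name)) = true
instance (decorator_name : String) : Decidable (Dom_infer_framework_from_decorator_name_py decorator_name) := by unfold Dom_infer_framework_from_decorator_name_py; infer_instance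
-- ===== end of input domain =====

-- B replaces A's per-call scan over framework decorator lists by one hand-flattened
-- decorator->framework table and a single lookup (idiomatic).

-- ===== PORT A =====
-- the dict literal framework_decorators, as an insertion-ordered Dict
def pvFrameworkDecorators : PySem.Dict String (List String) :=
  PySem.Dict.ofList
    [("angular", ["Component", "Directive", "Pipe", "Injectable", "Input", "Output"]),
     ("nestjs", ["Controller", "Module", "Injectable", "Get", "Post", "Put", "Delete"]),
     ("typeorm", ["Entity", "Column", "PrimaryGeneratedColumn"]),
     ("react", []),
     ("vue", []),
     ("express", [])]

-- the 'for framework, decorators in … .items(): if decorator_name in decorators: return framework' loop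
def pvScanA (decorator_name : String) : List (String × List String) → String
  | [] => "unknown"
  | (framework, decorators) :: rest =>
      if decorators.contains decorator_name then framework
      else pvScanA decorator_name rest

def infer_framework_from_decorator_name_py (decorator_name : String) : String :=
  pvScanA decorator_name pvFrameworkDecorators.items

-- ===== PORT B =====
-- Source B's flat module-level table _DECORATOR_TO_FRAMEWORK, a dict literal
def pvDecoratorToFramework : PySem.Dict String String :=
  PySem.Dict.ofList
    [("Component", "angular"), ("Directive", "angular"), ("Pipe", "angular"),
     ("Injectable", "angular"), ("Input", "angular"), ("Output", "angular"),
     ("Controller", "nestjs"), ("Module", "nestjs"), ("Get", "nestjs"),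
     ("Post", "nestjs"), ("Put", "nestjs"), ("Delete", "nestjs"),
     ("Entity", "typeorm"), ("Column", "typeorm"), ("PrimaryGeneratedColumn", "typeorm")]

def infer_framework_from_decorator_name_py_alt (decorator_name : String) : String :=
  pvDecoratorToFramework.getD decorator_name "unknown"

-- ===== PRECONDITION & SPEC =====
def Spec_infer_framework_from_decorator_name_py (decorator_name : String) (out : String) : Prop := out = infer_framework_from_decorator_name_py_alt decorator_name
instance (decorator_name : String) (out : String) : Decidable (Spec_infer_framework_from_decorator_name_py decorator_name out) := by unfold Spec_infer_framework_from_decorator_name_py; infer_instance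

-- ===== CLAIM (what is proved, stated in full; the proofs are below) =====
def Claim_equal_infer_framework_from_decorator_name_py : Prop := ∀ (decorator_name : String), Dom_infer_framework_from_decorator_name_py decorator_name → Spec_infer_framework_from_decorator_name_py decorator_name (infer_framework_from_decorator_name_py decorator_name)

-- ===== LEMMAS AND PROOFS =====

-- the dict literal's items, evaluated
theorem pvItemsA :
    pvFrameworkDecorators.items =
      [("angular", ["Component", "Directive", "Pipe", "Injectable", "Input", "Output"]),
       ("nestjs", ["Controller", "Module", "Injectable", "Get", "Post", "Put", "Delete"]),
       ("typeorm", ["Entity", "Column", "PrimaryGeneratedColumn"]),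
       ("react", []), ("vue", []), ("express", [])] := by rfl

-- the ofList literal as a raw Dict.mk (ofList dedups; the keys here are distinct)
theorem pvTableB :
    pvDecoratorToFramework =
      PySem.Dict.mk
        [("Component", "angular"), ("Directive", "angular"), ("Pipe", "angular"),
         ("Injectable", "angular"), ("Input", "angular"), ("Output", "angular"),
         ("Controller", "nestjs"), ("Module", "nestjs"), ("Get", "nestjs"),
         ("Post", "nestjs"), ("Put", "nestjs"), ("Delete", "nestjs"),
         ("Entity", "typeorm"), ("Column", "typeorm"), ("PrimaryGeneratedColumn", "typeorm")] := by rfl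

-- ===== VERDICT (by name: the statement is the Claim_ definition above) =====
set_option maxHeartbeats 1000000 in
theorem infer_framework_from_decorator_name_py_spec : Claim_equal_infer_framework_from_decorator_name_py := by
  intro d _
  unfold Spec_infer_framework_from_decorator_name_py
  unfold infer_framework_from_decorator_name_py infer_framework_from_decorator_name_py_alt
  by_cases h1 : d = "Component"
  · subst h1; rfl
  by_cases h2 : d = "Directive"
  · subst h2; rfl
  by_cases h3 : d = "Pipe"
  · subst h3; rfl
  by_cases h4 : d = "Injectable"
  · subst h4; rfl
  by_cases h5 : d = "Input"
  · subst h5; rfl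
  by_cases h6 : d = "Output"
  · subst h6; rfl
  by_cases h7 : d = "Controller"
  · subst h7; rfl
  by_cases h8 : d = "Module"
  · subst h8; rfl
  by_cases h9 : d = "Get"
  · subst h9; rfl
  by_cases h10 : d = "Post"
  · subst h10; rfl
  by_cases h11 : d = "Put"
  · subst h11; rfl
  by_cases h12 : d = "Delete"
  · subst h12; rfl
  by_cases h13 : d = "Entity"
  · subst h13; rfl
  by_cases h14 : d = "Column"
  · subst h14; rfl
  by_cases h15 : d = "PrimaryGeneratedColumn"
  · subst h15; rfl
  -- d is none of the 15 decorator names: both sides fall through to "unknown"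
  rw [pvItemsA, pvTableB]
  simp only [pvScanA, PySem.Dict.getD, PySem.Dict.get?_mk_cons, List.contains_cons,
    List.contains_nil, Bool.or_eq_true, beq_iff_eq, Bool.or_false]
  repeat rw [if_neg (by tauto)]
  rfl
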